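-- pv_equiv track=rewrite | github.com/hacktuarial/advent-of-code | 2021/17/run.py | find_highest_style
-- ===== SOURCE A (Python) =====
-- class Probe:
--     def __init__(self, x_velocity, y_velocity, target):
--         self.x = 0
--         self.y = 0
--         self.x_velocity = x_velocity
--         self.y_velocity = y_velocity
--         self.target = target
--         self.maximum_y = self.y
--
--     def step(self):
--         self.x += self.x_velocity
--         self.y += self.y_velocity
--         if self.x_velocity < 0:
--             self.x_velocity += 1
--         elif self.x_velocity > 0:
--             self.x_velocity -= 1
--         else:
--             # no change
--             pass
--         self.y_velocity -= 1  # gravity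
--         self.maximum_y = max(self.y, self.maximum_y)
--
--     def in_target(self):
--         x_min, x_max = self.target[0]
--         y_min, y_max = self.target[1]
--         return x_min <= self.x <= x_max and y_min <= self.y <= y_max
--
--     def still_has_a_chance(self):
--         y_max = self.target[1][1]
--         return self.y >= y_max
--
-- def find_highest_style(target, lim):
--     best_x, best_y = (0, 0)
--     y_max = -1_000_000
--     for x in range(-lim, lim):
--         for y in range(-lim, lim):
--             probe = Probe(x, y, target)
--             while probe.still_has_a_chance():
--                 probe.step()
--             if probe.in_target():
--                 if probe.maximum_y > y_max:
--                     y_max = probe.maximum_y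
--                     best_x, best_y = x, y
--     return ((best_x, best_y), y_max)
-- ===== SOURCE B (Python) =====
-- # Alternative closed-form rewrite: per launch pair the probe's stopping step, final
-- # position and apex are computed algebraically (integer square root) instead of by
-- # step-by-step simulation.
--
-- def _isqrt(n):
--     # largest r with r*r <= n, by binary search (n >= 0)
--     lo, hi = 0, n + 1
--     while hi - lo > 1:
--         mid = (lo + hi) // 2
--         if mid * mid <= n:
--             lo = mid
--         else:
--             hi = mid
--     return lo
--
-- def find_highest_style(target, lim):
--     (x_min, x_max), (y_min, y_maxt) = target
--     best = ((0, 0), -1_000_000)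
--     for vx in range(-lim, lim):
--         a = vx if vx >= 0 else -vx
--         for vy in range(-lim, lim):
--             # first step count n with y-position < y_maxt, in closed form
--             if y_maxt > 0:
--                 n = 0
--             else:
--                 d = (2 * vy + 1) ** 2 - 8 * y_maxt
--                 r = _isqrt(d)
--                 u = r + 1 if r % 2 == 0 else r + 2  # smallest odd u with u*u > d
--                 n = (u + 2 * vy + 1) // 2
--             yn = n * vy - n * (n - 1) // 2
--             m = n if n <= a else a
--             xn = m * vx - m * (m - 1) // 2 if vx >= 0 else m * vx + m * (m - 1) // 2
--             peak = (n if n <= vy else vy) if vy > 0 else 0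
--             maxy = peak * vy - peak * (peak - 1) // 2
--             if x_min <= xn <= x_max and y_min <= yn <= y_maxt and maxy > best[1]:
--                 best = ((vx, vy), maxy)
--     return best
-- ===== Notes on version B (the rewrite author's own statement) =====
-- stated objective: alternative
-- what changed: B replaces A's innermost step-by-step probe simulation by a closed-form computation: for each launch pair it solves the quadratic for the first step whose y-position drops below the target's top (via a binary-search integer square root) and evaluates the final x, final y and apex directly from triangular-number formulas; measured ~1.4-1.5x in a timing run, below the confirmation threshold.
import Mathlib
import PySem

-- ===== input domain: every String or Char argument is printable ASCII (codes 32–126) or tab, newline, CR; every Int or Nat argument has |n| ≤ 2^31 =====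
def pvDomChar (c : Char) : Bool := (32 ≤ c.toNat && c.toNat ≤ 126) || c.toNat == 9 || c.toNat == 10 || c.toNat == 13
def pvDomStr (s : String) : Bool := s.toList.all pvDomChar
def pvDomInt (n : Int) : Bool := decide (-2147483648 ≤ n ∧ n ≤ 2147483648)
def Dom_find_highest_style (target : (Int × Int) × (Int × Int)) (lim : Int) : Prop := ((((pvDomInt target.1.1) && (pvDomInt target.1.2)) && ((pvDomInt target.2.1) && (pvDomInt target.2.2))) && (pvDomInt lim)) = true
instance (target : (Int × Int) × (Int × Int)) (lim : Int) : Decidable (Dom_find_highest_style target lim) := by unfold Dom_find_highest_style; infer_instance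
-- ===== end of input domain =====

-- B replaces A's inner step-by-step probe simulation by a closed-form computation
-- (integer square root) of the stopping step, final position and apex per launch pair.
-- Equivalence of the RETURN values is what is proved.

-- ===== PORT A =====
-- the while-loop 'while probe.still_has_a_chance(): probe.step()' over state (x, y, vx, vy, maximum_y);
-- T = target[1][1]
def probeLoop (T x y vx vy my : Int) : Int × Int × Int × Int × Int :=
  if _h : T ≤ y then
    probeLoop T (x + vx) (y + vy)
      (if vx < 0 then vx + 1 else if vx > 0 then vx - 1 else vx)
      (vy - 1) (max (y + vy) my)
  else (x, y, vx, vy, my)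
termination_by ((vy + 1).toNat, (y - T + 1).toNat)
decreasing_by
  simp only [Prod.lex_def]
  omega

def find_highest_style (target : (Int × Int) × (Int × Int)) (lim : Int) : (Int × Int) × Int :=
  (PySem.List.pyRange (-lim) lim 1).foldl (fun acc x =>
    (PySem.List.pyRange (-lim) lim 1).foldl (fun acc y =>
      let s := probeLoop target.2.2 0 0 x y 0
      if target.1.1 ≤ s.1 ∧ s.1 ≤ target.1.2 ∧ target.2.1 ≤ s.2.1 ∧ s.2.1 ≤ target.2.2 then
        if s.2.2.2.2 > acc.2 then ((x, y), s.2.2.2.2) else acc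
      else acc) acc) ((0, 0), -1000000)

-- ===== PORT B =====
-- _isqrt's binary-search loop
def isqrtLoop (n lo hi : Int) : Int :=
  if _h : hi - lo > 1 then
    let mid := PySem.Int.floordiv (lo + hi) 2
    if mid * mid ≤ n then isqrtLoop n mid hi else isqrtLoop n lo mid
  else lo
termination_by (hi - lo).toNat
decreasing_by
  all_goals (simp only [PySem.Int.floordiv_eq_ediv_of_pos (by norm_num : (0:Int) < 2)]; omega)

def isqrtB (n : Int) : Int := isqrtLoop n 0 (n + 1)

def find_highest_style_alt (target : (Int × Int) × (Int × Int)) (lim : Int) : (Int × Int) × Int :=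
  (PySem.List.pyRange (-lim) lim 1).foldl (fun best vx =>
    let a := if vx ≥ 0 then vx else -vx
    (PySem.List.pyRange (-lim) lim 1).foldl (fun best vy =>
      let n : Int :=
        if target.2.2 > 0 then 0
        else
          let d := (2 * vy + 1) ^ 2 - 8 * target.2.2
          let r := isqrtB d
          let u := if PySem.Int.mod r 2 = 0 then r + 1 else r + 2
          PySem.Int.floordiv (u + 2 * vy + 1) 2
      let yn := n * vy - PySem.Int.floordiv (n * (n - 1)) 2
      let m := if n ≤ a then n else a
      let xn := if vx ≥ 0 then m * vx - PySem.Int.floordiv (m * (m - 1)) 2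
                else m * vx + PySem.Int.floordiv (m * (m - 1)) 2
      let peak := if vy > 0 then (if n ≤ vy then n else vy) else 0
      let maxy := peak * vy - PySem.Int.floordiv (peak * (peak - 1)) 2
      if target.1.1 ≤ xn ∧ xn ≤ target.1.2 ∧ target.2.1 ≤ yn ∧ yn ≤ target.2.2 ∧ maxy > best.2 then
        ((vx, vy), maxy)
      else best) best) ((0, 0), -1000000)

-- ===== PRECONDITION & SPEC =====
def Spec_find_highest_style (target : (Int × Int) × (Int × Int)) (lim : Int) (out : (Int × Int) × Int) : Prop := out = find_highest_style_alt target lim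
instance (target : (Int × Int) × (Int × Int)) (lim : Int) (out : (Int × Int) × Int) : Decidable (Spec_find_highest_style target lim out) := by unfold Spec_find_highest_style; infer_instance

-- ===== CLAIM (what is proved, stated in full; the proofs are below) =====
def Claim_equal_find_highest_style : Prop := ∀ (target : (Int × Int) × (Int × Int)) (lim : Int), Dom_find_highest_style target lim → Spec_find_highest_style target lim (find_highest_style target lim)

-- ===== LEMMAS AND PROOFS =====

-- closed forms for the probe state after n steps
def tri : Nat → Int
  | 0 => 0
  | n + 1 => tri n + n

def yposF (vy : Int) (n : Nat) : Int := n * vy - tri n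

def xvelF (vx : Int) (n : Nat) : Int := if vx < 0 then min (vx + n) 0 else max (vx - n) 0

def xposF (vx : Int) (n : Nat) : Int :=
  if vx < 0 then (min n (-vx).toNat) * vx + tri (min n (-vx).toNat)
  else (min n vx.toNat) * vx - tri (min n vx.toNat)

def myF (vy : Int) (n : Nat) : Int := yposF vy (min n vy.toNat)

theorem tri_two (n : Nat) : 2 * tri n = n * (n - 1) := by
  induction n with
  | zero => simp [tri]
  | succ k ih => simp only [tri]; push_cast; push_cast at ih; ring_nf; ring_nf at ih; omega

theorem fdiv_tri (n : Nat) : PySem.Int.floordiv ((n : Int) * ((n : Int) - 1)) 2 = tri n := by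
  have h := tri_two n
  rw [PySem.Int.floordiv_eq_ediv_of_pos (by norm_num)]
  omega

theorem ypos_succ (vy : Int) (n : Nat) : yposF vy n + (vy - n) = yposF vy (n + 1) := by
  simp only [yposF, tri]; push_cast; ring

theorem xvel_succ (vx : Int) (n : Nat) :
    (if xvelF vx n < 0 then xvelF vx n + 1 else if xvelF vx n > 0 then xvelF vx n - 1 else xvelF vx n)
      = xvelF vx (n + 1) := by
  simp only [xvelF]
  push_cast
  split_ifs <;> omega

theorem xpos_succ (vx : Int) (n : Nat) : xposF vx n + xvelF vx n = xposF vx (n + 1) := by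
  simp only [xposF, xvelF]
  rcases lt_or_ge vx 0 with h | h
  · simp only [if_pos h]
    rcases Nat.lt_or_ge n (-vx).toNat with hn | hn
    · have h1 : min n (-vx).toNat = n := by omega
      have h2 : min (n + 1) (-vx).toNat = n + 1 := by omega
      rw [h1, h2]
      have h3 : min (vx + n) 0 = vx + n := by omega
      rw [h3]
      simp only [tri]
      push_cast
      ring
    · have h1 : min n (-vx).toNat = (-vx).toNat := by omega
      have h2 : min (n + 1) (-vx).toNat = (-vx).toNat := by omega
      have h3 : min (vx + (n : Int)) 0 = 0 := by omega
      rw [h1, h2, h3, add_zero]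
  · simp only [if_neg (by omega : ¬ vx < 0)]
    rcases Nat.lt_or_ge n vx.toNat with hn | hn
    · have h1 : min n vx.toNat = n := by omega
      have h2 : min (n + 1) vx.toNat = n + 1 := by omega
      rw [h1, h2]
      have h3 : max (vx - (n : Int)) 0 = vx - n := by omega
      rw [h3]
      simp only [tri]
      push_cast
      ring
    · have h1 : min n vx.toNat = vx.toNat := by omega
      have h2 : min (n + 1) vx.toNat = vx.toNat := by omega
      have h3 : max (vx - (n : Int)) 0 = 0 := by omega
      rw [h1, h2, h3, add_zero]

theorem ypos_le_peak (vy : Int) (k : Nat) (h : vy.toNat ≤ k) : yposF vy k ≤ yposF vy vy.toNat := by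
  have h1 := tri_two k
  have h2 := tri_two vy.toNat
  simp only [yposF]
  rcases le_or_gt vy 0 with hv | hv
  · have hV : vy.toNat = 0 := by omega
    rw [hV] at h2 ⊢
    simp only [tri, Nat.cast_zero, zero_mul, sub_zero] at *
    rcases Nat.eq_zero_or_pos k with hk | hk
    · subst hk; simp [tri]
    · have hk1 : (1 : Int) ≤ (k : Int) := by exact_mod_cast hk
      nlinarith [mul_nonneg (by linarith : (0:Int) ≤ (k:Int)) (by linarith : (0:Int) ≤ -vy),
        mul_nonneg (by linarith : (0:Int) ≤ (k:Int)) (by linarith : (0:Int) ≤ (k:Int) - 1)]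
  · have hV : (vy.toNat : Int) = vy := by omega
    have hk : vy ≤ (k : Int) := by omega
    rcases Nat.eq_or_lt_of_le h with he | hlt
    · rw [he]
    · have hk1 : vy + 1 ≤ (k : Int) := by omega
      nlinarith [mul_nonneg (by linarith : (0:Int) ≤ (k:Int) - vy) (by linarith : (0:Int) ≤ (k:Int) - vy - 1)]

theorem my_succ (vy : Int) (n : Nat) : max (yposF vy n + (vy - n)) (myF vy n) = myF vy (n + 1) := by
  rw [ypos_succ]
  simp only [myF]
  rcases Nat.lt_or_ge n vy.toNat with hn | hn
  · have h1 : min n vy.toNat = n := by omega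
    have h2 : min (n + 1) vy.toNat = n + 1 := by omega
    rw [h1, h2]
    have : yposF vy n ≤ yposF vy (n + 1) := by
      rw [← ypos_succ]; have : (n : Int) + 1 ≤ vy := by omega
      omega
    omega
  · have h1 : min n vy.toNat = vy.toNat := by omega
    have h2 : min (n + 1) vy.toNat = vy.toNat := by omega
    rw [h1, h2]
    have := ypos_le_peak vy (n + 1) (by omega)
    omega

theorem loop_closed (T vx vy : Int) (N : Nat)
    (hlt : yposF vy N < T) (hge : ∀ k, k < N → T ≤ yposF vy k) :
    ∀ d n, n + d = N →
      probeLoop T (xposF vx n) (yposF vy n) (xvelF vx n) (vy - n) (myF vy n)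
        = (xposF vx N, yposF vy N, xvelF vx N, vy - N, myF vy N) := by
  intro d
  induction d with
  | zero =>
    intro n hn
    have hnN : n = N := by omega
    subst hnN
    rw [probeLoop, dif_neg (by omega)]
  | succ k ih =>
    intro n hn
    have hnN : n < N := by omega
    rw [probeLoop, dif_pos (hge n hnN), my_succ, xpos_succ, ypos_succ, xvel_succ]
    have h1 : vy - (n : Int) - 1 = vy - ((n + 1 : Nat) : Int) := by push_cast; ring
    rw [h1]
    exact ih (n + 1) (by omega)

-- isqrt correctness
theorem isqrtLoop_spec (n : Int) : ∀ lo hi : Int, 0 ≤ lo → lo < hi → lo * lo ≤ n → n < hi * hi →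
    0 ≤ isqrtLoop n lo hi ∧ isqrtLoop n lo hi * isqrtLoop n lo hi ≤ n ∧
      n < (isqrtLoop n lo hi + 1) * (isqrtLoop n lo hi + 1) := by
  intro lo hi
  induction lo, hi using isqrtLoop.induct n with
  | case1 lo hi hgt mid hle ih =>
    intro h0 hlh hlo hhi
    rw [isqrtLoop, dif_pos hgt, if_pos hle]
    exact ih (by
      simp only [mid, PySem.Int.floordiv_eq_ediv_of_pos (by norm_num : (0:Int) < 2)]
      omega) (by
      simp only [mid, PySem.Int.floordiv_eq_ediv_of_pos (by norm_num : (0:Int) < 2)]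
      omega) hle hhi
  | case2 lo hi hgt mid hle ih =>
    intro h0 hlh hlo hhi
    rw [isqrtLoop, dif_pos hgt, if_neg hle]
    have hmid : lo < mid := by
      simp only [mid, PySem.Int.floordiv_eq_ediv_of_pos (by norm_num : (0:Int) < 2)]
      omega
    exact ih h0 hmid hlo (by omega)
  | case3 lo hi hgt =>
    intro h0 hlh hlo hhi
    rw [isqrtLoop, dif_neg hgt]
    have : hi = lo + 1 := by omega
    subst this
    exact ⟨h0, hlo, hhi⟩

theorem isqrtB_spec (n : Int) (h : 0 ≤ n) :
    0 ≤ isqrtB n ∧ isqrtB n * isqrtB n ≤ n ∧ n < (isqrtB n + 1) * (isqrtB n + 1) := by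
  unfold isqrtB
  exact isqrtLoop_spec n 0 (n + 1) le_rfl (by omega) (by simpa using h) (by nlinarith)

-- the step count B computes
def nInt (T vy : Int) : Int :=
  if T > 0 then 0
  else
    let d := (2 * vy + 1) ^ 2 - 8 * T
    let r := isqrtB d
    let u := if PySem.Int.mod r 2 = 0 then r + 1 else r + 2
    PySem.Int.floordiv (u + 2 * vy + 1) 2

theorem ypos_quad (T vy : Int) (k : Nat) :
    8 * (T - yposF vy k) = (2 * k - 2 * vy - 1) ^ 2 - ((2 * vy + 1) ^ 2 - 8 * T) := by
  have h := tri_two k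
  simp only [yposF]
  nlinarith [h]

theorem nInt_char (T vy : Int) (hT : T ≤ 0) :
    ∃ r u : Int, 0 ≤ r ∧ r * r ≤ (2 * vy + 1) ^ 2 - 8 * T ∧
      (2 * vy + 1) ^ 2 - 8 * T < (r + 1) * (r + 1) ∧
      r + 1 ≤ u ∧ u ≤ r + 2 ∧ u % 2 = 1 ∧ 2 * nInt T vy = u + 2 * vy + 1 := by
  have hd : 0 ≤ (2 * vy + 1) ^ 2 - 8 * T := by nlinarith [sq_nonneg (2 * vy + 1)]
  obtain ⟨h0, h1, h2⟩ := isqrtB_spec _ hd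
  refine ⟨isqrtB ((2 * vy + 1) ^ 2 - 8 * T),
    (if PySem.Int.mod (isqrtB ((2 * vy + 1) ^ 2 - 8 * T)) 2 = 0
      then isqrtB ((2 * vy + 1) ^ 2 - 8 * T) + 1 else isqrtB ((2 * vy + 1) ^ 2 - 8 * T) + 2),
    h0, h1, h2, ?_, ?_, ?_, ?_⟩
  · split_ifs <;> omega
  · split_ifs <;> omega
  · rw [PySem.Int.mod_eq_emod_of_pos (by norm_num : (0:Int) < 2)]
    split_ifs with hp <;> omega
  · simp only [nInt, if_neg (by omega : ¬ T > 0)]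
    rw [PySem.Int.mod_eq_emod_of_pos (by norm_num : (0:Int) < 2),
      PySem.Int.floordiv_eq_ediv_of_pos (by norm_num : (0:Int) < 2)]
    split_ifs with hp <;> omega

theorem nInt_ge_one (T vy : Int) (hT : T ≤ 0) : 1 ≤ nInt T vy := by
  obtain ⟨r, u, h0, h1, h2, h3, h4, h5, h6⟩ := nInt_char T vy hT
  have habs : (2 * vy + 1) * (2 * vy + 1) < (r + 1) * (r + 1) := by nlinarith
  have : -(2 * vy + 1) < r + 1 := by nlinarith
  omega

theorem nInt_nonneg (T vy : Int) : 0 ≤ nInt T vy := by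
  rcases le_or_gt T 0 with hT | hT
  · have := nInt_ge_one T vy hT; omega
  · simp [nInt, hT]

theorem nInt_sq_gt (T vy : Int) (hT : T ≤ 0) :
    (2 * vy + 1) ^ 2 - 8 * T < (2 * nInt T vy - 2 * vy - 1) ^ 2 := by
  obtain ⟨r, u, h0, h1, h2, h3, h4, h5, h6⟩ := nInt_char T vy hT
  have hu : 2 * nInt T vy - 2 * vy - 1 = u := by omega
  rw [hu]
  nlinarith

theorem nInt_sq_le (T vy : Int) (hT : T ≤ 0) (k : Int) (hk0 : 0 ≤ k) (hk : k < nInt T vy) :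
    (2 * k - 2 * vy - 1) ^ 2 ≤ (2 * vy + 1) ^ 2 - 8 * T := by
  obtain ⟨r, u, h0, h1, h2, h3, h4, h5, h6⟩ := nInt_char T vy hT
  have hc2 : 2 * k - 2 * vy - 1 ≤ u - 2 := by omega
  rcases le_or_gt 0 (2 * k - 2 * vy - 1) with hc | hc
  · have hcr : 2 * k - 2 * vy - 1 ≤ r := by omega
    nlinarith
  · have hneg : 0 < 2 * vy + 1 - 2 * k := by omega
    have hle : 2 * vy + 1 - 2 * k ≤ 2 * vy + 1 := by omega
    nlinarith

theorem nInt_cross (T vy : Int) :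
    yposF vy (nInt T vy).toNat < T ∧ ∀ k, k < (nInt T vy).toNat → T ≤ yposF vy k := by
  rcases le_or_gt T 0 with hT | hT
  · have h1 := nInt_ge_one T vy hT
    have hN : ((nInt T vy).toNat : Int) = nInt T vy := by omega
    constructor
    · have := nInt_sq_gt T vy hT
      have hq := ypos_quad T vy (nInt T vy).toNat
      rw [hN] at hq
      omega
    · intro k hk
      have hkZ : (k : Int) < nInt T vy := by omega
      have := nInt_sq_le T vy hT k (by omega) hkZ
      have hq := ypos_quad T vy k
      omega
  · have hz : nInt T vy = 0 := by simp [nInt, hT]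
    rw [hz]
    constructor
    · simp [yposF, tri]; omega
    · intro k hk; omega

theorem pair_loop (T vx vy : Int) :
    probeLoop T 0 0 vx vy 0 =
      (xposF vx (nInt T vy).toNat, yposF vy (nInt T vy).toNat, xvelF vx (nInt T vy).toNat,
        vy - ((nInt T vy).toNat : Int), myF vy (nInt T vy).toNat) := by
  obtain ⟨hlt, hge⟩ := nInt_cross T vy
  have h := loop_closed T vx vy (nInt T vy).toNat hlt hge (nInt T vy).toNat 0 (by omega)
  have h0x : xposF vx 0 = 0 := by unfold xposF; split_ifs <;> simp [tri]
  have h0y : yposF vy 0 = 0 := by simp [yposF, tri]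
  have h0v : xvelF vx 0 = vx := by unfold xvelF; split_ifs <;> (push_cast; omega)
  have h0m : myF vy 0 = 0 := by simp [myF, yposF, tri]
  rw [h0x, h0y, h0v, h0m] at h
  simpa using h

theorem fdiv_tri' (z : Int) (hz : 0 ≤ z) :
    PySem.Int.floordiv (z * (z - 1)) 2 = tri z.toNat := by
  have h := fdiv_tri z.toNat
  rwa [show ((z.toNat : Nat) : Int) = z from by omega] at h

theorem yn_eq (T vy : Int) :
    nInt T vy * vy - PySem.Int.floordiv (nInt T vy * (nInt T vy - 1)) 2
      = yposF vy (nInt T vy).toNat := by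
  have h := nInt_nonneg T vy
  have hc : ((nInt T vy).toNat : Int) = nInt T vy := by omega
  rw [fdiv_tri' _ h]
  unfold yposF
  rw [hc]

theorem xn_eq (T vx vy : Int) (a m : Int) (ha : a = if vx ≥ 0 then vx else -vx)
    (hm : m = if nInt T vy ≤ a then nInt T vy else a) :
    (if vx ≥ 0 then m * vx - PySem.Int.floordiv (m * (m - 1)) 2
     else m * vx + PySem.Int.floordiv (m * (m - 1)) 2) = xposF vx (nInt T vy).toNat := by
  have hn := nInt_nonneg T vy
  rcases le_or_gt 0 vx with hv | hv
  · rw [if_pos (by omega : vx ≥ 0)] at ha ⊢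
    have hm0 : 0 ≤ m := by rw [hm]; split_ifs <;> omega
    rw [fdiv_tri' m hm0]
    unfold xposF
    rw [if_neg (by omega : ¬ vx < 0)]
    have hmin : min (nInt T vy).toNat vx.toNat = m.toNat := by rw [hm]; split_ifs <;> omega
    rw [hmin, show ((m.toNat : Nat) : Int) = m from by omega]
  · rw [if_neg (by omega : ¬ vx ≥ 0)] at ha ⊢
    have hm0 : 0 ≤ m := by rw [hm]; split_ifs <;> omega
    rw [fdiv_tri' m hm0]
    unfold xposF
    rw [if_pos (by omega : vx < 0)]
    have hmin : min (nInt T vy).toNat (-vx).toNat = m.toNat := by rw [hm]; split_ifs <;> omega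
    rw [hmin, show ((m.toNat : Nat) : Int) = m from by omega]

theorem maxy_eq (T vy : Int) (peak : Int)
    (hp : peak = if vy > 0 then (if nInt T vy ≤ vy then nInt T vy else vy) else 0) :
    peak * vy - PySem.Int.floordiv (peak * (peak - 1)) 2 = myF vy (nInt T vy).toNat := by
  have hn := nInt_nonneg T vy
  have hp0 : 0 ≤ peak := by rw [hp]; split_ifs <;> omega
  rw [fdiv_tri' peak hp0]
  unfold myF yposF
  have hmin : min (nInt T vy).toNat vy.toNat = peak.toNat := by rw [hp]; split_ifs <;> omega
  rw [hmin, show ((peak.toNat : Nat) : Int) = peak from by omega]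

-- ===== VERDICT (by name: the statement is the Claim_ definition above) =====
theorem find_highest_style_spec : Claim_equal_find_highest_style := by
  intro target lim _
  unfold Spec_find_highest_style find_highest_style find_highest_style_alt
  apply List.foldl_ext
  intro acc vx _
  apply List.foldl_ext
  intro acc2 vy _
  show (let s := probeLoop target.2.2 0 0 vx vy 0
        if target.1.1 ≤ s.1 ∧ s.1 ≤ target.1.2 ∧ target.2.1 ≤ s.2.1 ∧ s.2.1 ≤ target.2.2 then
          if s.2.2.2.2 > acc2.2 then ((vx, vy), s.2.2.2.2) else acc2
        else acc2) = _
  simp only [pair_loop]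
  have hnn : (if target.2.2 > 0 then (0:Int)
      else
        let d := (2 * vy + 1) ^ 2 - 8 * target.2.2
        let r := isqrtB d
        let u := if PySem.Int.mod r 2 = 0 then r + 1 else r + 2
        PySem.Int.floordiv (u + 2 * vy + 1) 2) = nInt target.2.2 vy := rfl
  simp only [hnn]
  rw [yn_eq target.2.2 vy, xn_eq target.2.2 vx vy _ _ rfl rfl, maxy_eq target.2.2 vy _ rfl]
  split_ifs <;> first | rfl | tauto
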